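-- pv_equiv track=rewrite | github.com/joshanashakya/dissertation | workspace/dataset/java-python/GeeksForGeeks/4127/A/2.py | findEqualPoint
-- ===== SOURCE A (Python) =====
-- def findEqualPoint(arr, n):
--
--     # To store first indexes of
--     # distinct elements of arr[]
--     distArr = [0] * n
--
--     # Traverse input array and
--     # store indexes of first
--     # occurrences of distinct
--     # elements in distArr[]
--     i = 0
--     di = 0
--     while (i < n):
--
--         # This element must be
--         # first occurrence of a
--         # number (this is made
--         # sure by below loop),
--         # so add it to distinct array.
--         distArr[di] = i
--         di += 1
--         i += 1
--
--         # Avoid all copies of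
--         # arr[i] and move to
--         # next distinct element.
--         while (i < n and
--                arr[i] == arr[i - 1]):
--             i += 1
--
--     # di now has total number
--     # of distinct elements.
--     # If di is odd, then equal
--     # point exists and is at
--     # di/2, otherwise return -1.
--     return distArr[di >> 1] if (di & 1) else -1
-- ===== SOURCE B (Python) =====
-- def findEqualPoint(arr, n):
--     # Pass 1: count the runs of equal consecutive elements (O(1) extra space,
--     # no list of first indices is ever built).
--     runs = 0 if n <= 0 else 1 + sum(1 for i in range(1, n) if arr[i] != arr[i - 1])
--     if runs % 2 == 0:
--         return -1
--     # Pass 2: walk again and return the start index of run number runs >> 1.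
--     target = runs >> 1
--     if target == 0:
--         return 0
--     seen = 0
--     for i in range(1, n):
--         if arr[i] != arr[i - 1]:
--             seen += 1
--             if seen == target:
--                 return i
--     return 0  # unreachable: the middle run exists since runs is odd
-- ===== Notes on version B (the rewrite author's own statement) =====
-- stated objective: alternative
-- what changed: B never materialises A's array of first-occurrence indices: a first pass only COUNTS the runs of equal consecutive elements, and if the count is odd a second pass walks the array again and returns the start index of the middle run, using O(1) extra space instead of A's O(n) distArr.
import Mathlib
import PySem

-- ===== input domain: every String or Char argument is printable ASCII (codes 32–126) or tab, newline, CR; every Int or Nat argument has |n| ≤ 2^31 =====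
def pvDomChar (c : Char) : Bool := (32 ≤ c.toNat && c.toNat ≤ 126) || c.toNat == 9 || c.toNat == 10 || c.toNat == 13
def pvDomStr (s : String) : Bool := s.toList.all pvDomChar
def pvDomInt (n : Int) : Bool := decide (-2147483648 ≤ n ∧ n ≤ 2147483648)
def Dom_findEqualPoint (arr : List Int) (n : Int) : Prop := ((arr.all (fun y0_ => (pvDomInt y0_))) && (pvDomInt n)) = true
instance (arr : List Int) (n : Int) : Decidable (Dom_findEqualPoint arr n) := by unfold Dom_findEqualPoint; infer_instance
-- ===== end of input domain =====

-- B drops A's O(n) array of first-occurrence indices: it first only COUNTS the runs of equal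
-- consecutive elements, then (if the count is odd) walks the array a second time and returns
-- the start index of the middle run, in O(1) extra space.

-- ===== PORT A =====
-- inner `while (i < n and arr[i] == arr[i-1]): i += 1`
-- (inside Pre_ every arr access is in range, so getD is exact there)
def pvA_skip (arr : List Int) (n i : Nat) : Nat :=
  if i < n ∧ arr.getD i 0 == arr.getD (i - 1) 0 then pvA_skip arr n (i + 1) else i
termination_by n - i
decreasing_by omega

theorem pvA_skip_le (arr : List Int) (n i : Nat) : i ≤ pvA_skip arr n i := by
  unfold pvA_skip
  split
  · exact le_trans (Nat.le_succ i) (pvA_skip_le arr n (i + 1))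
  · exact le_refl i
termination_by n - i
decreasing_by omega

-- outer `while (i < n): distArr[di] = i; di += 1; i += 1; <inner skip>`
def pvA_loop (arr : List Int) (n i di : Nat) (distArr : List Int) : Nat × List Int :=
  if h : i < n then
    pvA_loop arr n (pvA_skip arr n (i + 1)) (di + 1) (distArr.set di (i : Int))
  else (di, distArr)
termination_by n - i
decreasing_by have := pvA_skip_le arr n (i + 1); omega

def findEqualPoint (arr : List Int) (n : Int) : Int :=
  let m := n.toNat                                   -- [0]*n is empty for n ≤ 0
  let res := pvA_loop arr m 0 0 (List.replicate m 0)
  if res.1 &&& 1 = 1 then res.2.getD (res.1 >>> 1) 0 else -1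

-- ===== PORT B =====
-- pass 2: `seen = 0; for i in range(1, n): if arr[i] != arr[i-1]: seen += 1; if seen == target: return i`
def pvB_find (arr : List Int) (xs : List Int) (seen target : Nat) : Int :=
  match xs with
  | [] => 0  -- dead code in Source B too: the middle run exists since the run count is odd
  | i :: rest =>
    if !(arr.getD i.toNat 0 == arr.getD (i.toNat - 1) 0) then
      if seen + 1 = target then i else pvB_find arr rest (seen + 1) target
    else pvB_find arr rest seen target

def findEqualPoint_alt (arr : List Int) (n : Int) : Int :=
  -- pass 1: `runs = 0 if n <= 0 else 1 + sum(1 for i in range(1, n) if arr[i] != arr[i-1])`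
  let runs : Nat :=
    if n ≤ 0 then 0
    else 1 + ((PySem.List.pyRange 1 n 1).countP
      (fun i => !(arr.getD i.toNat 0 == arr.getD (i.toNat - 1) 0)))
  if runs % 2 = 0 then -1
  else
    let target := runs >>> 1
    if target = 0 then 0
    else pvB_find arr (PySem.List.pyRange 1 n 1) 0 target

-- ===== PRECONDITION & SPEC =====
-- Pre_ excludes exactly the inputs where the Python raises IndexError:
-- n ≥ 2 with n > len(arr) (for n ≤ 1 no element of arr is ever read).
def Pre_findEqualPoint (arr : List Int) (n : Int) : Prop := n ≤ (arr.length : Int) ∨ n ≤ 1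
instance (arr : List Int) (n : Int) : Decidable (Pre_findEqualPoint arr n) := by unfold Pre_findEqualPoint; infer_instance
def pvWitness_findEqualPoint : List Int × Int := ([1, 1, 2], 3)

def Spec_findEqualPoint (arr : List Int) (n : Int) (out : Int) : Prop := out = findEqualPoint_alt arr n
instance (arr : List Int) (n : Int) (out : Int) : Decidable (Spec_findEqualPoint arr n out) := by unfold Spec_findEqualPoint; infer_instance

-- ===== CLAIM (what is proved, stated in full; the proofs are below) =====
def Claim_equal_findEqualPoint : Prop := ∀ (arr : List Int) (n : Int), Dom_findEqualPoint arr n → Pre_findEqualPoint arr n → Spec_findEqualPoint arr n (findEqualPoint arr n)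

-- ===== LEMMAS AND PROOFS =====

-- boundary predicate on Nat indices
def pvBnd (arr : List Int) (i : Nat) : Bool :=
  i == 0 || !(arr.getD i 0 == arr.getD (i - 1) 0)

-- the list of indices the outer loop records, starting at i
def pvRec (arr : List Int) (n i : Nat) : List Nat :=
  if h : i < n then i :: pvRec arr n (pvA_skip arr n (i + 1)) else []
termination_by n - i
decreasing_by have := pvA_skip_le arr n (i + 1); omega

-- writing a list of values at consecutive positions
def pvWrite (l : List Int) (d : Nat) (xs : List Nat) : List Int :=
  match xs with
  | [] => l
  | x :: xs => pvWrite (l.set d (x : Int)) (d + 1) xs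

theorem pvA_loop_eq (arr : List Int) (n : Nat) :
    ∀ i di distArr, pvA_loop arr n i di distArr =
      (di + (pvRec arr n i).length, pvWrite distArr di (pvRec arr n i)) := by
  intro i di distArr
  unfold pvA_loop pvRec
  split
  · rename_i h
    rw [pvA_loop_eq arr n (pvA_skip arr n (i + 1)) (di + 1) (distArr.set di (i : Int))]
    simp [pvWrite]
    omega
  · simp [pvWrite]
termination_by i => n - i
decreasing_by have := pvA_skip_le arr n (i + 1); omega

-- reading back from pvWrite
theorem pvWrite_getD (l : List Int) (d : Nat) (xs : List Nat) (k : Nat)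
    (hk : k < xs.length) (hl : d + xs.length ≤ l.length) :
    (pvWrite l d xs).getD (d + k) 0 = ((xs.getD k 0 : Nat) : Int) := by
  induction xs generalizing l d k with
  | nil => simp at hk
  | cons x xs ih =>
    cases k with
    | zero =>
      simp only [pvWrite, Nat.add_zero]
      have hset : ∀ (ys : List Nat) (l' : List Int) (d' : Nat), d' > d →
          (pvWrite l' d' ys).getD d 0 = l'.getD d 0 := by
        intro ys
        induction ys with
        | nil => intro _ _ _; rfl
        | cons y ys ihy =>
          intro l' d' hd
          simp only [pvWrite]
          rw [ihy _ _ (by omega)]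
          rcases Nat.lt_or_ge d l'.length with h | h
          · rw [List.getD_eq_getElem?_getD, List.getD_eq_getElem?_getD,
              List.getElem?_set_ne (by omega)]
          · have h1 : (l'.set d' ((y : Nat) : Int))[d]? = none :=
              List.getElem?_eq_none (by simpa using h)
            have h2 : l'[d]? = none := List.getElem?_eq_none h
            rw [List.getD_eq_getElem?_getD, List.getD_eq_getElem?_getD, h1, h2]
      rw [hset xs (l.set d (x : Int)) (d + 1) (by omega)]
      simp at hl
      rw [List.getD_eq_getElem?_getD, List.getElem?_set_self (by omega)]
      simp
    | succ k =>
      simp only [pvWrite]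
      have : d + (k + 1) = (d + 1) + k := by omega
      rw [this, ih _ _ _ (by simpa using hk) (by simp at hl ⊢; omega)]
      simp

-- pvA_skip leaves the bnd-filter of the remaining range unchanged (for i ≥ 1)
theorem pvA_skip_filter (arr : List Int) (n : Nat) :
    ∀ i, 1 ≤ i →
      (List.range' (pvA_skip arr n i) (n - pvA_skip arr n i)).filter (pvBnd arr) =
      (List.range' i (n - i)).filter (pvBnd arr) := by
  intro i hi
  unfold pvA_skip
  split
  · rename_i h
    rw [pvA_skip_filter arr n (i + 1) (by omega)]
    have hb : pvBnd arr i = false := by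
      simp only [pvBnd, Bool.or_eq_false_iff, Bool.not_eq_false', h.2, and_true]
      simp; omega
    have hn : n - i = (n - (i + 1)) + 1 := by omega
    rw [hn, List.range'_succ, List.filter_cons_of_neg (by simp [hb])]
  · rfl
termination_by i => n - i
decreasing_by omega

-- on exit of the inner while, either the range is exhausted or a boundary holds
theorem pvA_skip_exit (arr : List Int) (n i : Nat) :
    n ≤ pvA_skip arr n i ∨ pvBnd arr (pvA_skip arr n i) = true := by
  unfold pvA_skip
  split
  · exact pvA_skip_exit arr n (i + 1)
  · rename_i h
    by_cases hn : i < n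
    · right
      simp only [pvBnd, Bool.or_eq_true, Bool.not_eq_true', beq_eq_false_iff_ne, ne_eq]
      exact Or.inr fun hc => h ⟨hn, beq_iff_eq.mpr hc⟩
    · left; omega
termination_by n - i
decreasing_by omega

-- the recorded indices are exactly the boundary indices of [i, n)
theorem pvRec_filter (arr : List Int) (n : Nat) :
    ∀ i, (n ≤ i ∨ pvBnd arr i = true) →
      pvRec arr n i = (List.range' i (n - i)).filter (pvBnd arr) := by
  intro i hi
  unfold pvRec
  split
  · rename_i h
    have hb : pvBnd arr i = true := by rcases hi with hi | hi; omega; exact hi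
    rw [pvRec_filter arr n _ (pvA_skip_exit arr n (i + 1)),
      pvA_skip_filter arr n (i + 1) (by omega)]
    have hn : n - i = (n - (i + 1)) + 1 := by omega
    rw [hn, List.range'_succ, List.filter_cons_of_pos hb]
  · rename_i h
    have : n - i = 0 := by omega
    simp [this]
termination_by i => n - i
decreasing_by have := pvA_skip_le arr n (i + 1); omega

-- B's second pass returns the (target-seen)-th remaining boundary index
theorem pvB_find_spec (arr : List Int) (Q : Int → Bool)
    (hQ : Q = fun i => !(arr.getD i.toNat 0 == arr.getD (i.toNat - 1) 0)) :
    ∀ (xs : List Int) (seen target : Nat), seen < target →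
      target - seen ≤ (xs.filter Q).length →
      pvB_find arr xs seen target = (xs.filter Q).getD (target - seen - 1) 0 := by
  intro xs
  induction xs with
  | nil => intro seen target h1 h2; simp at h2; omega
  | cons i rest ih =>
    intro seen target h1 h2
    unfold pvB_find
    by_cases hq : Q i = true
    · rw [List.filter_cons_of_pos hq] at h2 ⊢
      rw [hQ] at hq
      simp only [hq, if_true]
      by_cases he : seen + 1 = target
      · have : target - seen - 1 = 0 := by omega
        simp [he, this]
      · rw [if_neg he, ih (seen + 1) target (by omega) (by simp at h2 ⊢; omega)]
        have : target - seen - 1 = (target - (seen + 1) - 1) + 1 := by omega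
        simp [this]
    · rw [List.filter_cons_of_neg (by simpa using hq)] at h2 ⊢
      rw [hQ] at hq
      simp only [hq, Bool.false_eq_true, if_false]
      exact ih seen target h1 h2

-- ===== VERDICT (by name: the statement is the Claim_ definition above) =====
theorem findEqualPoint_spec : Claim_equal_findEqualPoint := by
  unfold Claim_equal_findEqualPoint
  intro arr n _ _
  unfold Spec_findEqualPoint findEqualPoint findEqualPoint_alt
  -- A's recorded list is the filter of boundary indices over range n.toNat
  have hrec : pvRec arr n.toNat 0 = (List.range n.toNat).filter (pvBnd arr) := by
    rw [pvRec_filter arr n.toNat 0 (Or.inr (by simp [pvBnd]))]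
    simp [List.range_eq_range']
  by_cases hn : n ≤ 0
  · -- both sides: no runs, return -1
    have h0 : ¬ (0 : Nat) < n.toNat := by omega
    have hr0 : pvRec arr n.toNat 0 = [] := by unfold pvRec; simp [h0]
    simp [pvA_loop_eq, hr0, pvWrite, hn]
  · replace hn : 0 < n := by omega
    have hm1 : 1 ≤ n.toNat := by omega
    set m := n.toNat with hmdef
    -- split range m = 0 :: range' 1 (m-1); pvBnd arr 0 = true
    set G := (List.range' 1 (m - 1)).filter (pvBnd arr) with hG
    have hGlen : G.length ≤ m - 1 := le_trans (List.length_filter_le _ _) (by simp)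
    have hF : (List.range m).filter (pvBnd arr) = 0 :: G := by
      rw [List.range_eq_range']
      have : m = (m - 1) + 1 := by omega
      rw [this, List.range'_succ, List.filter_cons_of_pos (by simp [pvBnd])]
    -- B's range(1,n) is the Int-cast of range' 1 (m-1)
    set Q : Int → Bool := fun i => !(arr.getD i.toNat 0 == arr.getD (i.toNat - 1) 0) with hQdef
    have hfun : ∀ k, k ∈ List.range (m - 1) → Q (1 + (k : Int)) = pvBnd arr (1 + k) := by
      intro k _
      have h1 : ((1 : Int) + (k : Int)).toNat = 1 + k := by omega
      simp only [hQdef, pvBnd, h1]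
      simp
    have hL : (PySem.List.pyRange 1 n 1).filter Q =
        ((List.range' 1 (m - 1)).filter (pvBnd arr)).map (fun k : Nat => (k : Int)) := by
      rw [PySem.List.pyRange_one, List.filter_map]
      have hmm : (n - 1).toNat = m - 1 := by omega
      rw [hmm]
      have : (List.range (m - 1)).filter (Q ∘ fun k : Nat => 1 + (k : Int)) =
          (List.range (m - 1)).filter (fun k => pvBnd arr (1 + k)) :=
        List.filter_congr (fun k hk => hfun k hk)
      rw [this]
      have hr : List.range' 1 (m - 1) = (List.range (m - 1)).map (fun k => 1 + k) := by
        rw [List.range'_eq_map_range]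
      rw [hr, List.filter_map, List.map_map]
      exact List.map_congr_left (fun k _ => by simp)
    have hcount : (PySem.List.pyRange 1 n 1).countP Q = G.length := by
      rw [List.countP_eq_length_filter, hL, List.length_map]
    -- A's di = 1 + G.length = B's runs
    simp only [pvA_loop_eq, hrec, hF, Nat.zero_add, List.length_cons,
      if_neg (not_le.mpr hn), hcount]
    set runs := G.length + 1 with hruns
    have hand : runs &&& 1 = runs % 2 := Nat.and_one_is_mod runs
    by_cases hodd : runs % 2 = 1
    · rw [if_pos (by rw [hand]; exact hodd), if_neg (by omega)]
      -- target = runs >>> 1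
      have hsr : runs >>> 1 = runs / 2 := Nat.shiftRight_one runs
      have htgt : (1 + G.length) >>> 1 = runs >>> 1 := by
        rw [Nat.add_comm 1 G.length]
      rw [htgt]
      by_cases ht0 : runs >>> 1 = 0
      · -- runs = 1, F = [0]; A returns 0
        have hg0 : G.length = 0 := by
          rw [hsr] at ht0; omega
        have hGnil : G = [] := List.eq_nil_of_length_eq_zero hg0
        rw [if_pos ht0, ht0]
        simp [hGnil, pvWrite]
      · rw [if_neg ht0]
        set target := runs >>> 1 with htdef
        have htpos : 1 ≤ target := by omega
        have htle : target ≤ G.length := by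
          rw [hsr] at htdef; omega
        -- A side: (0 :: G).getD target = G.getD (target - 1)
        have hA : ((0 :: G).getD target 0 : Nat) = G.getD (target - 1) 0 := by
          have : target = (target - 1) + 1 := by omega
          rw [this]; rfl
        have hwr := pvWrite_getD (List.replicate m 0) 0 (0 :: G) target
          (by simp; omega) (by simp; omega)
        rw [Nat.zero_add] at hwr
        rw [hwr, hA]
        -- B side
        rw [pvB_find_spec arr Q hQdef (PySem.List.pyRange 1 n 1) 0 target htpos
          (by rw [hL, List.length_map]; omega)]
        rw [hL, Nat.sub_zero]
        have hlt : target - 1 < G.length := by omega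
        rw [List.getD_eq_getElem _ _ hlt,
          List.getD_eq_getElem _ _ (show target - 1 < (G.map (fun k : Nat => (k : Int))).length by
            simpa using hlt),
          List.getElem_map]
    · rw [if_neg (by rw [hand]; exact hodd), if_pos (by omega)]
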